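-- pv_equiv track=rewrite | github.com/akashrajkn/akruti | src/preprocess.py | get_msd_dict_with_types
-- ===== SOURCE A (Python) =====
-- def get_msd_dict_with_types(msds):
--     ''''
--     Converts msds to dictionary
--     '''
--     msd_size   = 0
--     desc_2_idx = {}
--     idx_2_desc = {}
--
--     for obj in msds:
--         for key in obj.keys():
--             if desc_2_idx.get(key) is None:
--                 desc_2_idx[key] = msd_size
--                 idx_2_desc[msd_size] = key
--                 msd_size += 1
--
--     # MSD options dict
--     msd_options = {}
--     count       = 0
--
--     for key, value in desc_2_idx.items():
--         current_options = {}
--         for msd in msds: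
--             for k, v in msd.items():
--                 if k == key:
--                     if current_options.get(v) is None:
--                         current_options[v] = count
--                         count += 1
--
--         msd_options[value] = current_options
--
--     return desc_2_idx, idx_2_desc, msd_options
-- ===== SOURCE B (Python) =====
-- def get_msd_dict_with_types(msds):
--     # One pass over all (key, value) pairs collecting, per key in first-seen
--     # order, its distinct values in first-seen order; then assign indices and
--     # the global option counter in a single sweep over that table.
--     opts = {}
--     for obj in msds:
--         for k, v in obj.items():
--             vs = opts.get(k)
--             if vs is None:
--                 opts[k] = {v: None}
--             elif v not in vs:
--                 vs[v] = None
--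
--     desc_2_idx = {}
--     idx_2_desc = {}
--     msd_options = {}
--     count = 0
--     for i, (k, vs) in enumerate(opts.items()):
--         desc_2_idx[k] = i
--         idx_2_desc[i] = k
--         cur = {}
--         for v in vs:
--             cur[v] = count
--             count += 1
--         msd_options[i] = cur
--     return desc_2_idx, idx_2_desc, msd_options
-- ===== Notes on version B (the rewrite author's own statement) =====
-- stated objective: faster
-- what changed: One pass over all (key,value) pairs builds an ordered per-key table of distinct values, then a single sweep over that table assigns key indices and the running option counter, instead of re-scanning every msd dict once per distinct key.
import Mathlib
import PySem

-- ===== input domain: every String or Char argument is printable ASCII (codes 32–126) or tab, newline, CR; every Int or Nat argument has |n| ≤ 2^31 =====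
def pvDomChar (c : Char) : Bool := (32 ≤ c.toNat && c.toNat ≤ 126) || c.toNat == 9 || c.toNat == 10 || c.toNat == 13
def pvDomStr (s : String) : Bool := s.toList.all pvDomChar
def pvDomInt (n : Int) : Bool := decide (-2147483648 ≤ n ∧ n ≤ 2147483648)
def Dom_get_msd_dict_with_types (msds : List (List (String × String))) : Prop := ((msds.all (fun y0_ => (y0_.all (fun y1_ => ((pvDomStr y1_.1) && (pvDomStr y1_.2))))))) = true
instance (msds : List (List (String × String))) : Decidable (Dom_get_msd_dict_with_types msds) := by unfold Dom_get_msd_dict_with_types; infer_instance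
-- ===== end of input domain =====

-- B is a one-pass regrouping of the same computation; equivalence of return values is proved for all inputs.

-- ===== PORT A =====
-- first loop of A: thread (msd_size, desc_2_idx, idx_2_desc) through every key
def pvAStep1 (st : Int × PySem.Dict String Int × PySem.Dict Int String) (key : String) :
    Int × PySem.Dict String Int × PySem.Dict Int String :=
  if (st.2.1.get? key).isNone then
    (st.1 + 1, st.2.1.insert key st.1, st.2.2.insert st.1 key)
  else st

-- inner pass of A's second loop: thread (current_options, count) through every (k, v)
def pvAStepOpt (key : String) (st : PySem.Dict String Int × Int) (p : String × String) :
    PySem.Dict String Int × Int :=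
  if p.1 == key then
    if (st.1.get? p.2).isNone then (st.1.insert p.2 st.2, st.2 + 1) else st
  else st

def get_msd_dict_with_types (msds : List (List (String × String))) :
    (List (String × Int)) × (List (Int × String)) × (List (Int × List (String × Int))) :=
  let s1 := msds.foldl (fun st obj => (obj.map Prod.fst).foldl pvAStep1 st)
      (0, PySem.Dict.empty, PySem.Dict.empty)
  let desc_2_idx := s1.2.1
  let idx_2_desc := s1.2.2
  let s2 := desc_2_idx.items.foldl
      (fun (st : PySem.Dict Int (PySem.Dict String Int) × Int) kv =>
        let inner := msds.foldl (fun st2 msd => msd.foldl (pvAStepOpt kv.1) st2)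
            (PySem.Dict.empty, st.2)
        (st.1.insert kv.2 inner.1, inner.2))
      (PySem.Dict.empty, 0)
  (desc_2_idx.items, idx_2_desc.items, s2.1.items.map (fun p => (p.1, p.2.items)))

-- ===== PORT B =====
-- one pass: per-key ordered table of distinct values (dict used as ordered set in Source B)
def pvBStep1 (opts : PySem.Dict String (List String)) (p : String × String) :
    PySem.Dict String (List String) :=
  match opts.get? p.1 with
  | none => opts.insert p.1 [p.2]
  | some vs => if p.2 ∈ vs then opts else opts.insert p.1 (vs ++ [p.2])

-- second loop body of Source B: the enumerate sweep assigning indices and the running counter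
def pvBStep2
    (st : PySem.Dict String Int × PySem.Dict Int String × PySem.Dict Int (List (String × Int)) × Int)
    (e : (String × List String) × Nat) :
    PySem.Dict String Int × PySem.Dict Int String × PySem.Dict Int (List (String × Int)) × Int :=
  let i : Int := e.2
  let cur := e.1.2.foldl (fun (c : List (String × Int) × Int) v => (c.1 ++ [(v, c.2)], c.2 + 1))
      ([], st.2.2.2)
  (st.1.insert e.1.1 i, st.2.1.insert i e.1.1, st.2.2.1.insert i cur.1, cur.2)

def get_msd_dict_with_types_alt (msds : List (List (String × String))) :
    (List (String × Int)) × (List (Int × String)) × (List (Int × List (String × Int))) :=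
  let opts := msds.foldl (fun opts obj => obj.foldl pvBStep1 opts) PySem.Dict.empty
  let fin := opts.items.zipIdx.foldl pvBStep2
      (PySem.Dict.empty, PySem.Dict.empty, PySem.Dict.empty, 0)
  (fin.1.items, fin.2.1.items, fin.2.2.1.items)

-- ===== PRECONDITION & SPEC =====
def Spec_get_msd_dict_with_types (msds : List (List (String × String))) (out : (List (String × Int)) × (List (Int × String)) × (List (Int × List (String × Int)))) : Prop := out = get_msd_dict_with_types_alt msds
instance (msds : List (List (String × String))) (out : (List (String × Int)) × (List (Int × String)) × (List (Int × List (String × Int)))) : Decidable (Spec_get_msd_dict_with_types msds out) := by unfold Spec_get_msd_dict_with_types; infer_instance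

-- ===== CLAIM (what is proved, stated in full; the proofs are below) =====
def Claim_equal_get_msd_dict_with_types : Prop := ∀ (msds : List (List (String × String))), Dom_get_msd_dict_with_types msds → Spec_get_msd_dict_with_types msds (get_msd_dict_with_types msds)


-- ===== LEMMAS AND PROOFS =====

-- the flattened pair stream and its derived tables (proof-only helpers)
def pvK (L : List (String × String)) : List String := PySem.Set.ofList (L.map Prod.fst)

def pvV (L : List (String × String)) (k : String) : List String :=
  PySem.Set.ofList ((L.filter (fun p => p.1 == k)).map Prod.snd)

def pvD2I (K : List String) (i : Nat) : List (String × Int) :=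
  (K.zipIdx i).map (fun e => (e.1, (e.2 : Int)))

def pvI2D (K : List String) (i : Nat) : List (Int × String) :=
  (K.zipIdx i).map (fun e => ((e.2 : Int), e.1))

def pvMo (L : List (String × String)) : List String → Nat → Int → List (Int × List (String × Int))
  | [], _, _ => []
  | k :: K, i, c =>
      ((i : Int), (pvV L k).zipIdx.map (fun w => (w.1, c + (w.2 : Int)))) ::
        pvMo L K (i + 1) (c + ((pvV L k).length : Int))

def pvCnt (L : List (String × String)) (K : List String) (c : Int) : Int :=
  K.foldl (fun c k => c + ((pvV L k).length : Int)) c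

-- generic facts about Dict.mk on explicit item lists
theorem pv_mk_get?_none {k : Type} [BEq k] [LawfulBEq k] {n : Type} (l : List (k × n)) (key : k)
    (h : key ∉ l.map Prod.fst) : (PySem.Dict.mk l).get? key = none := by
  rw [PySem.Dict.get?_eq_none_iff_not_mem_keys]
  simpa [PySem.Dict.keys] using h

theorem pv_mk_get?_some {k : Type} [BEq k] [LawfulBEq k] {n : Type} (l : List (k × n)) (key : k) (v : n)
    (hm : (key, v) ∈ l) (hn : (l.map Prod.fst).Nodup) : (PySem.Dict.mk l).get? key = some v := by
  apply PySem.Dict.get?_of_mem_items <;> simp [PySem.Dict.keys, *]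

theorem pv_mk_insert_fresh {k : Type} [BEq k] [LawfulBEq k] {n : Type} (l : List (k × n)) (key : k) (v : n)
    (h : key ∉ l.map Prod.fst) : ((PySem.Dict.mk l).insert key v).items = l ++ [(key, v)] := by
  rw [PySem.Dict.items_insert_of_not_contains]
  simp only [PySem.Dict.contains_mk, List.any_eq_false, beq_iff_eq, Prod.forall]
  exact fun a b hm ha => h (List.mem_map.mpr ⟨(a, b), hm, ha⟩)

theorem pv_mk_insert_mem {k : Type} [BEq k] [LawfulBEq k] {n : Type} (l : List (k × n)) (key : k) (v : n)
    (h : key ∈ l.map Prod.fst) :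
    ((PySem.Dict.mk l).insert key v).items = l.map (fun p => if p.1 == key then (key, v) else p) := by
  rw [PySem.Dict.items_insert_of_contains]
  simp only [PySem.Dict.contains_mk]
  rcases List.mem_map.mp h with ⟨p, hp, hk⟩
  exact List.any_eq_true.mpr ⟨p, hp, by simpa using hk⟩

-- pvK / pvV under appending one pair
theorem pvK_append (L : List (String × String)) (p : String × String) :
    pvK (L ++ [p]) = PySem.Set.add (pvK L) p.1 := by
  simp [pvK, PySem.Set.ofList_eq_foldl, List.foldl_append]

theorem pvV_append (L : List (String × String)) (p : String × String) (key : String) :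
    pvV (L ++ [p]) key = if p.1 == key then PySem.Set.add (pvV L key) p.2 else pvV L key := by
  by_cases h : p.1 == key <;>
    simp [pvV, PySem.Set.ofList_eq_foldl, List.filter_append, h, List.foldl_append]

theorem pv_set_add_mem {a : Type} [BEq a] [LawfulBEq a] (s : PySem.Set a) (x : a) (h : x ∈ s) :
    PySem.Set.add s x = s := by
  simp [PySem.Set.add, PySem.Set.contains, h]

theorem pvV_nil_of_not_mem (L : List (String × String)) (key : String)
    (h : key ∉ L.map Prod.fst) : pvV L key = [] := by
  have : L.filter (fun p => p.1 == key) = [] := by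
    rw [List.filter_eq_nil_iff]
    intro p hp hbeq
    exact h (List.mem_map.mpr ⟨p, hp, by simpa using hbeq⟩)
  simp [pvV, this, PySem.Set.ofList_eq_foldl]

theorem pvD2I_fst (K : List String) (i : Nat) : (pvD2I K i).map Prod.fst = K := by
  simp [pvD2I, List.map_map]
  exact List.zipIdx_map_fst i K

theorem pvI2D_fst_not_mem (K : List String) (j : Nat) (hj : K.length ≤ j) :
    ((j : Int)) ∉ (pvI2D K 0).map Prod.fst := by
  simp only [pvI2D, List.map_map]
  intro hmem
  rcases List.mem_map.mp hmem with ⟨e, he, hfst⟩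
  have := List.snd_lt_add_of_mem_zipIdx he
  have : e.2 = j := by
    have : ((e.2 : Int)) = (j : Int) := by simpa using hfst
    exact_mod_cast this
  omega

-- phase 1 of A: the two index dicts are the enumerated first-seen key list
theorem pv_lemA1 (L : List (String × String)) :
    L.foldl (fun st p => pvAStep1 st p.1) ((0 : Int), PySem.Dict.empty, PySem.Dict.empty)
      = (((pvK L).length : Int), PySem.Dict.mk (pvD2I (pvK L) 0), PySem.Dict.mk (pvI2D (pvK L) 0)) := by
  induction L using List.reverseRecOn with
  | nil => rfl
  | append_singleton L p ih =>
    rw [List.foldl_append, List.foldl_cons, List.foldl_nil, ih, pvK_append]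
    by_cases h : p.1 ∈ pvK L
    · rw [pv_set_add_mem _ _ h]
      have hg : (PySem.Dict.mk (pvD2I (pvK L) 0)).get? p.1 ≠ none := by
        rw [Ne, PySem.Dict.get?_eq_none_iff_not_mem_keys]
        simp only [PySem.Dict.keys]
        rw [pvD2I_fst]
        simpa using h
      unfold pvAStep1
      rcases ho : (PySem.Dict.mk (pvD2I (pvK L) 0)).get? p.1 with _ | v
      · exact absurd ho hg
      · simp
    · have hg : (PySem.Dict.mk (pvD2I (pvK L) 0)).get? p.1 = none := by
        apply pv_mk_get?_none
        rw [pvD2I_fst]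
        simpa using h
      have hK : PySem.Set.add (pvK L) p.1 = pvK L ++ [p.1] := by
        simp [PySem.Set.add, PySem.Set.contains, h]
      rw [hK]
      unfold pvAStep1
      simp only [hg, Option.isNone_none, if_pos]
      refine Prod.ext ?_ (Prod.ext ?_ ?_)
      · simp
      · show ((PySem.Dict.mk (pvD2I (pvK L) 0)).insert p.1 ((pvK L).length : Int))
            = PySem.Dict.mk (pvD2I (pvK L ++ [p.1]) 0)
        apply PySem.Dict.ext
        rw [pv_mk_insert_fresh]
        · simp [pvD2I, List.zipIdx_append]
        · rw [pvD2I_fst]; simpa using h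
      · show ((PySem.Dict.mk (pvI2D (pvK L) 0)).insert ((pvK L).length : Int) p.1)
            = PySem.Dict.mk (pvI2D (pvK L ++ [p.1]) 0)
        apply PySem.Dict.ext
        rw [pv_mk_insert_fresh]
        · simp [pvI2D, List.zipIdx_append]
        · exact pvI2D_fst_not_mem _ _ le_rfl


-- phase 1 of B: opts is the per-key table of first-seen distinct values
theorem pv_lemB1 (L : List (String × String)) :
    L.foldl pvBStep1 PySem.Dict.empty
      = PySem.Dict.mk ((pvK L).map (fun k => (k, pvV L k))) := by
  induction L using List.reverseRecOn with
  | nil => rfl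
  | append_singleton L p ih =>
    rw [List.foldl_append, List.foldl_cons, List.foldl_nil, ih]
    have hfst : ((pvK L).map (fun k => (k, pvV L k))).map Prod.fst = pvK L := by
      rw [List.map_map]
      exact List.map_id' _
    unfold pvBStep1
    by_cases h : p.1 ∈ pvK L
    · have hsome : (PySem.Dict.mk ((pvK L).map (fun k => (k, pvV L k)))).get? p.1
          = some (pvV L p.1) := by
        apply pv_mk_get?_some
        · exact List.mem_map.mpr ⟨p.1, h, rfl⟩
        · rw [hfst]; exact PySem.Set.nodup_ofList _
      rw [hsome]
      by_cases hv : p.2 ∈ pvV L p.1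
      · simp only [if_pos hv]
        rw [pvK_append, pv_set_add_mem _ _ h]
        congr 1
        apply List.map_congr_left
        intro k hk
        rw [pvV_append]
        by_cases hpk : p.1 == k
        · have : p.1 = k := by simpa using hpk
          subst this
          rw [if_pos hpk, pv_set_add_mem _ _ hv]
        · rw [if_neg (by simpa using (by simpa using hpk : p.1 ≠ k))]
      · simp only [if_neg hv]
        apply PySem.Dict.ext
        rw [pv_mk_insert_mem _ _ _ (by rw [hfst]; exact h)]
        rw [pvK_append, pv_set_add_mem _ _ h, List.map_map]
        apply List.map_congr_left
        intro k hk
        by_cases hpk : k = p.1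
        · subst hpk
          simp only [Function.comp, beq_self_eq_true, if_pos]
          rw [pvV_append, if_pos (by simp)]
          simp [PySem.Set.add, PySem.Set.contains, hv]
        · simp only [Function.comp]
          rw [if_neg (by simpa using hpk)]
          rw [pvV_append, if_neg (by simpa using Ne.symm hpk)]
    · have hnone : (PySem.Dict.mk ((pvK L).map (fun k => (k, pvV L k)))).get? p.1 = none := by
        apply pv_mk_get?_none
        rw [hfst]; exact h
      rw [hnone]
      apply PySem.Dict.ext
      rw [pv_mk_insert_fresh _ _ _ (by rw [hfst]; exact h)]
      rw [pvK_append]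
      have hK : PySem.Set.add (pvK L) p.1 = pvK L ++ [p.1] := by
        simp [PySem.Set.add, PySem.Set.contains, h]
      rw [hK, List.map_append]
      congr 1
      · apply List.map_congr_left
        intro k hk
        rw [pvV_append, if_neg (by simpa using (fun e => h (e ▸ hk) : p.1 ≠ k))]
      · simp only [List.map_cons, List.map_nil]
        have hv0 : pvV L p.1 = [] := by
          apply pvV_nil_of_not_mem
          intro hmem
          exact h (by simpa [pvK, PySem.Set.mem_ofList] using hmem)
        rw [pvV_append, if_pos (by simp), hv0]
        rfl

theorem pv_zip_fst {a b : Type} (vs : List a) (i : Nat) (g : a × Nat → b) :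
    ((vs.zipIdx i).map (fun w => (w.1, g w))).map Prod.fst = vs := by
  rw [List.map_map]
  exact List.zipIdx_map_fst i vs

-- A's inner option scan for one key, from an arbitrary running count
theorem pv_lemIA (L : List (String × String)) (key : String) (c0 : Int) :
    L.foldl (pvAStepOpt key) (PySem.Dict.empty, c0)
      = (PySem.Dict.mk ((pvV L key).zipIdx.map (fun w => (w.1, c0 + (w.2 : Int)))),
         c0 + ((pvV L key).length : Int)) := by
  induction L using List.reverseRecOn with
  | nil => simp [pvV, PySem.Set.ofList_eq_foldl, PySem.Dict.empty]
  | append_singleton L p ih =>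
    rw [List.foldl_append, List.foldl_cons, List.foldl_nil, ih]
    unfold pvAStepOpt
    by_cases hk : p.1 == key
    · rw [if_pos hk]
      by_cases hv : p.2 ∈ pvV L key
      · have hsome : (PySem.Dict.mk ((pvV L key).zipIdx.map
            (fun w => (w.1, c0 + (w.2 : Int))))).get? p.2 ≠ none := by
          rw [Ne, PySem.Dict.get?_eq_none_iff_not_mem_keys]
          simp only [PySem.Dict.keys]
          rw [pv_zip_fst]
          simpa using hv
        rcases ho : (PySem.Dict.mk ((pvV L key).zipIdx.map
            (fun w => (w.1, c0 + (w.2 : Int))))).get? p.2 with _ | v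
        · exact absurd ho hsome
        · simp only [ho, Option.isNone_some, Bool.false_eq_true, ite_false]
          rw [pvV_append, if_pos hk, pv_set_add_mem _ _ hv]
      · have hnone : (PySem.Dict.mk ((pvV L key).zipIdx.map
            (fun w => (w.1, c0 + (w.2 : Int))))).get? p.2 = none := by
          apply pv_mk_get?_none
          rw [pv_zip_fst]
          exact hv
        rw [hnone]
        simp only [Option.isNone_none, if_pos]
        rw [pvV_append, if_pos hk]
        have hadd : PySem.Set.add (pvV L key) p.2 = pvV L key ++ [p.2] := by
          simp [PySem.Set.add, PySem.Set.contains, hv]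
        rw [hadd]
        refine Prod.ext ?_ ?_
        · show ((PySem.Dict.mk _).insert p.2 (c0 + ((pvV L key).length : Int)))
              = PySem.Dict.mk (((pvV L key ++ [p.2]).zipIdx).map (fun w => (w.1, c0 + (w.2 : Int))))
          apply PySem.Dict.ext
          rw [pv_mk_insert_fresh _ _ _ (by rw [pv_zip_fst]; exact hv)]
          simp [List.zipIdx_append]
        · show c0 + ((pvV L key).length : Int) + 1 = c0 + (((pvV L key ++ [p.2]).length : Nat) : Int)
          simp only [List.length_append, List.length_cons, List.length_nil]
          push_cast
          ring
    · rw [if_neg hk]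
      rw [pvV_append, if_neg hk]

-- Source B's cur loop
theorem pv_lemIB (vs : List String) (acc : List (String × Int)) (c0 : Int) :
    vs.foldl (fun (c : List (String × Int) × Int) v => (c.1 ++ [(v, c.2)], c.2 + 1)) (acc, c0)
      = (acc ++ vs.zipIdx.map (fun w => (w.1, c0 + (w.2 : Int))), c0 + (vs.length : Int)) := by
  induction vs generalizing acc c0 with
  | nil => simp
  | cons v vs ih =>
    rw [List.foldl_cons, ih]
    refine Prod.ext ?_ ?_
    · show acc ++ [(v, c0)] ++ vs.zipIdx.map (fun w => (w.1, c0 + 1 + (w.2 : Int)))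
          = acc ++ ((v :: vs).zipIdx.map (fun w => (w.1, c0 + (w.2 : Int))))
      rw [List.zipIdx_cons, List.append_assoc]
      congr 1
      show ([(v, c0)] : List (String × Int)) ++ _ = ((v, 0) :: vs.zipIdx (0 + 1)).map (fun w => (w.1, c0 + (w.2 : Int)))
      rw [List.map_cons]
      simp only [Nat.zero_add, List.zipIdx_succ, List.map_map]
      rw [List.singleton_append]
      refine List.cons_eq_cons.mpr ⟨by norm_num, ?_⟩
      apply List.map_congr_left
      intro w _
      simp only [Function.comp]
      refine Prod.ext rfl ?_
      show c0 + 1 + (w.2 : Int) = c0 + ((w.2 + 1 : Nat) : Int)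
      push_cast
      ring
    · show c0 + 1 + (vs.length : Int) = c0 + (((v :: vs).length : Nat) : Int)
      simp only [List.length_cons]
      push_cast
      ring

-- A's outer option loop, with the inner scan replaced by its closed form
theorem pv_lemA3 (L : List (String × String)) (K : List String) (i : Nat) (c : Int)
    (A : PySem.Dict Int (PySem.Dict String Int))
    (hA : ∀ q ∈ A.items, ∀ j : Nat, i ≤ j → q.1 ≠ (j : Int)) :
    ((K.zipIdx i).map (fun e => (e.1, (e.2 : Int)))).foldl
        (fun (st : PySem.Dict Int (PySem.Dict String Int) × Int) kv =>
          (st.1.insert kv.2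
              (PySem.Dict.mk ((pvV L kv.1).zipIdx.map (fun w => (w.1, st.2 + (w.2 : Int))))),
           st.2 + ((pvV L kv.1).length : Int)))
        (A, c)
      = (PySem.Dict.mk (A.items ++ (pvMo L K i c).map (fun p => (p.1, PySem.Dict.mk p.2))),
         pvCnt L K c) := by
  induction K generalizing i c A with
  | nil =>
    simp only [List.zipIdx_nil, List.map_nil, List.foldl_nil, pvMo, List.append_nil, pvCnt]
  | cons k K ih =>
    rw [List.zipIdx_cons, List.map_cons, List.foldl_cons]
    have hfresh : ((i : Int)) ∉ A.items.map Prod.fst := by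
      intro hm
      rcases List.mem_map.mp hm with ⟨q, hq, hq1⟩
      exact hA q hq i le_rfl hq1
    have hins : (A.insert (i : Int)
        (PySem.Dict.mk ((pvV L k).zipIdx.map (fun w => (w.1, c + (w.2 : Int)))))).items
        = A.items ++ [((i : Int),
            PySem.Dict.mk ((pvV L k).zipIdx.map (fun w => (w.1, c + (w.2 : Int)))))] :=
      pv_mk_insert_fresh A.items _ _ hfresh
    rw [ih (i + 1) (c + ((pvV L k).length : Int)) _ ?_]
    · refine Prod.ext ?_ rfl
      show PySem.Dict.mk _ = PySem.Dict.mk _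
      apply PySem.Dict.ext
      show _ ++ _ = _
      rw [hins, List.append_assoc]
      rfl
    · intro q hq j hj
      rw [hins] at hq
      rcases List.mem_append.mp hq with hq | hq
      · exact hA q hq j (by omega)
      · have : q = ((i : Int), _) := List.mem_singleton.mp hq
        rw [this]
        intro hc
        have hij : (i : Int) = (j : Int) := hc
        have : i = j := by exact_mod_cast hij
        omega

-- B's enumerate sweep
theorem pv_lemB2 (L : List (String × String)) (K : List String) (i : Nat) (c : Int)
    (d2i : PySem.Dict String Int) (i2d : PySem.Dict Int String)
    (mo : PySem.Dict Int (List (String × Int)))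
    (hK : K.Nodup)
    (hd : ∀ q ∈ d2i.items, q.1 ∉ K)
    (hi : ∀ q ∈ i2d.items, ∀ j : Nat, i ≤ j → q.1 ≠ (j : Int))
    (hm_ : ∀ q ∈ mo.items, ∀ j : Nat, i ≤ j → q.1 ≠ (j : Int)) :
    ((K.map (fun k => (k, pvV L k))).zipIdx i).foldl pvBStep2 (d2i, i2d, mo, c)
      = (PySem.Dict.mk (d2i.items ++ pvD2I K i), PySem.Dict.mk (i2d.items ++ pvI2D K i),
         PySem.Dict.mk (mo.items ++ pvMo L K i c), pvCnt L K c) := by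
  induction K generalizing i c d2i i2d mo with
  | nil =>
    simp only [List.map_nil, List.zipIdx_nil, List.foldl_nil, pvD2I, pvI2D, pvMo, pvCnt,
      List.append_nil]
  | cons k K ih =>
    rw [List.map_cons, List.zipIdx_cons, List.foldl_cons]
    have hdf : k ∉ d2i.items.map Prod.fst := by
      intro hm
      rcases List.mem_map.mp hm with ⟨q, hq, hq1⟩
      exact hd q hq (hq1 ▸ List.mem_cons_self)
    have hif : ((i : Int)) ∉ i2d.items.map Prod.fst := by
      intro hm
      rcases List.mem_map.mp hm with ⟨q, hq, hq1⟩
      exact hi q hq i le_rfl hq1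
    have hmf : ((i : Int)) ∉ mo.items.map Prod.fst := by
      intro hm
      rcases List.mem_map.mp hm with ⟨q, hq, hq1⟩
      exact hm_ q hq i le_rfl hq1
    have hstep : pvBStep2 (d2i, i2d, mo, c) ((k, pvV L k), i)
        = (d2i.insert k (i : Int), i2d.insert (i : Int) k,
           mo.insert (i : Int) ((pvV L k).zipIdx.map (fun w => (w.1, c + (w.2 : Int)))),
           c + ((pvV L k).length : Int)) := by
      unfold pvBStep2
      simp only []
      rw [pv_lemIB]
      rfl
    rw [hstep]
    rw [ih (i + 1) (c + ((pvV L k).length : Int)) _ _ _ (List.Nodup.of_cons hK) ?_ ?_ ?_]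
    · refine Prod.ext ?_ (Prod.ext ?_ (Prod.ext ?_ rfl))
      · apply PySem.Dict.ext
        show _ ++ _ = _
        rw [pv_mk_insert_fresh d2i.items _ _ hdf, List.append_assoc]
        rfl
      · apply PySem.Dict.ext
        show _ ++ _ = _
        rw [pv_mk_insert_fresh i2d.items _ _ hif, List.append_assoc]
        rfl
      · apply PySem.Dict.ext
        show _ ++ _ = _
        rw [pv_mk_insert_fresh mo.items _ _ hmf, List.append_assoc]
        rfl
    · intro q hq
      rw [pv_mk_insert_fresh d2i.items _ _ hdf] at hq
      rcases List.mem_append.mp hq with hq | hq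
      · exact fun hmem => hd q hq (List.mem_cons_of_mem _ hmem)
      · rw [List.mem_singleton.mp hq]
        exact (List.nodup_cons.mp hK).1
    · intro q hq j hj
      rw [pv_mk_insert_fresh i2d.items _ _ hif] at hq
      rcases List.mem_append.mp hq with hq | hq
      · exact hi q hq j (by omega)
      · rw [List.mem_singleton.mp hq]
        intro hc
        have hij : (i : Int) = (j : Int) := hc
        have : i = j := by exact_mod_cast hij
        omega
    · intro q hq j hj
      rw [pv_mk_insert_fresh mo.items _ _ hmf] at hq
      rcases List.mem_append.mp hq with hq | hq
      · exact hm_ q hq j (by omega)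
      · rw [List.mem_singleton.mp hq]
        intro hc
        have hij : (i : Int) = (j : Int) := hc
        have : i = j := by exact_mod_cast hij
        omega

-- ===== VERDICT (by name: the statement is the Claim_ definition above) =====
theorem get_msd_dict_with_types_spec : Claim_equal_get_msd_dict_with_types := by
  intro msds _
  unfold Spec_get_msd_dict_with_types
  unfold get_msd_dict_with_types get_msd_dict_with_types_alt
  simp only [List.foldl_map]
  rw [← List.foldl_flatten, ← List.foldl_flatten]
  rw [pv_lemA1, pv_lemB1]
  have hfun : (fun (st : PySem.Dict Int (PySem.Dict String Int) × Int) (kv : String × Int) =>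
      (st.1.insert kv.2
          ((msds.foldl (fun st2 msd => msd.foldl (pvAStepOpt kv.1) st2) (PySem.Dict.empty, st.2)).1),
       (msds.foldl (fun st2 msd => msd.foldl (pvAStepOpt kv.1) st2) (PySem.Dict.empty, st.2)).2))
      = (fun (st : PySem.Dict Int (PySem.Dict String Int) × Int) kv =>
      (st.1.insert kv.2
          (PySem.Dict.mk ((pvV msds.flatten kv.1).zipIdx.map (fun w => (w.1, st.2 + (w.2 : Int))))),
       st.2 + ((pvV msds.flatten kv.1).length : Int))) := by
    funext st kv
    rw [← List.foldl_flatten, pv_lemIA]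
  rw [hfun]
  dsimp only
  rw [show pvD2I (pvK msds.flatten) 0
        = (pvK msds.flatten).zipIdx.map (fun e => (e.1, (e.2 : Int))) from rfl]
  rw [pv_lemA3 msds.flatten (pvK msds.flatten) 0 0 PySem.Dict.empty
        (by intro q hq j _; simp [PySem.Dict.empty] at hq)]
  rw [pv_lemB2 msds.flatten (pvK msds.flatten) 0 0 PySem.Dict.empty PySem.Dict.empty PySem.Dict.empty
        (PySem.Set.nodup_ofList _)
        (by intro q hq; simp [PySem.Dict.empty] at hq)
        (by intro q hq j _; simp [PySem.Dict.empty] at hq)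
        (by intro q hq j _; simp [PySem.Dict.empty] at hq)]
  dsimp only
  refine Prod.ext ?_ (Prod.ext ?_ ?_)
  · simp [PySem.Dict.empty, pvD2I]
  · simp [PySem.Dict.empty]
  · simp only [PySem.Dict.empty, List.nil_append, List.map_map]
    apply List.map_id''
    intro x
    rfl
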